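-- pv_equiv track=rewrite | github.com/Aukvary/NSU | ML/f_sem/Battery_Cap.py | split_material
-- ===== SOURCE A (Python) =====
-- def split_material(mat: str):
--     words = []
--     i = 0
--     n = len(mat)
--
--     while i < n:
--         # Находим начало элемента (заглавная буква)
--         if mat[i].isupper():
--             # Находим конец элемента (строчные буквы)
--             j = i + 1
--             while j < n and mat[j].islower():
--                 j += 1
--
--             element = mat[i:j]
--
--             # Находим число после элемента
--             k = j
--             while k < n and mat[k].isdigit():
--                 k += 1
--
--             count = int(mat[j:k]) if j < k else 1
--             words.extend([element] * count)
--
--             i = k  # Переходим к следующему элементу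
--         else:
--             i += 1
--
--     return words
-- ===== SOURCE B (Python) =====
-- def split_material(mat: str):
--     # Single left-to-right state machine: one pass over the characters,
--     # carrying the pending element name and its digit string; flush on
--     # each new uppercase letter (or on a stray character) and at the end.
--     words = []
--     elem = None     # pending element name (None = nothing pending)
--     digits = ""     # digit string collected after the pending element
--     for c in mat:
--         if c.isupper():
--             if elem is not None:
--                 words.extend([elem] * (int(digits) if digits else 1))
--             elem = c
--             digits = ""
--         elif elem is not None and c.islower() and digits == "":
--             elem += c
--         elif elem is not None and c.isdigit():
--             digits += c
--         else:
--             if elem is not None: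
--                 words.extend([elem] * (int(digits) if digits else 1))
--             elem = None
--             digits = ""
--     if elem is not None:
--         words.extend([elem] * (int(digits) if digits else 1))
--     return words
-- ===== Notes on version B (the rewrite author's own statement) =====
-- stated objective: alternative
-- what changed: Replaced A's index-based scan with three nested while loops (and slicing mat[i:j], mat[j:k]) by a single left-to-right state-machine pass over the characters that carries the pending element name and digit string and flushes on boundaries.
import Mathlib
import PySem

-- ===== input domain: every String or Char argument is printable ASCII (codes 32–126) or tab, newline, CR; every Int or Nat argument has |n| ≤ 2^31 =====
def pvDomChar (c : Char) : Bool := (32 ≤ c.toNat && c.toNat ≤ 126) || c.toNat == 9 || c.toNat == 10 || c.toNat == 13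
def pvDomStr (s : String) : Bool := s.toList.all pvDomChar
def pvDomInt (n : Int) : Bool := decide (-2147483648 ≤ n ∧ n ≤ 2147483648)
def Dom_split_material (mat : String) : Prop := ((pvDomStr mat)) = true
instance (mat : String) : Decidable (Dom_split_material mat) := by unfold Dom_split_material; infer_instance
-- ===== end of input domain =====

-- B replaces A's three-pointer index scan by a single one-pass state machine; objective: alternative (same cost).

-- ===== PORT A =====
-- count = int(digits) if digits nonempty else 1; int() never fails on a nonempty digit run, so getD 0 is never taken.
def pvCount (gs : List Char) : Nat :=
  if gs = [] then 1 else ((PySem.Int.ofChars? gs).getD 0).toNat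

-- A's outer while, recursing on the remaining suffix; the two inner whiles advance j over the
-- lowercase run and k over the digit run, i.e. takeWhile/dropWhile; mat[i:j] and mat[j:k] are those runs.
def splitLoop : List Char → List String
  | [] => []
  | c :: rest =>
    if PySem.Chars.isupper c then
      let lows := rest.takeWhile PySem.Chars.islower
      let after := rest.dropWhile PySem.Chars.islower
      let ds := after.takeWhile PySem.Chars.isdigit
      let after2 := after.dropWhile PySem.Chars.isdigit
      List.replicate (pvCount ds) (String.mk (c :: lows)) ++ splitLoop after2
    else splitLoop rest
termination_by cs => cs.length
decreasing_by
  · calc (after2).length ≤ after.length := List.length_dropWhile_le ..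
      _ ≤ rest.length := List.length_dropWhile_le ..
      _ < (c :: rest).length := by simp
  · simp

def split_material (mat : String) : List String := splitLoop mat.toList

-- ===== PORT B =====
-- state: (words so far, pending element chars (none = no pending), pending digit chars)
def pvFlush : List String → Option (List Char) → List Char → List String
  | out, none, _ => out
  | out, some e, gs => out ++ List.replicate (pvCount gs) (String.mk e)

def pvStep : List String × Option (List Char) × List Char → Char → List String × Option (List Char) × List Char
  | (out, elem, gs), c =>
    if PySem.Chars.isupper c then
      (pvFlush out elem gs, some [c], [])
    else if elem.isSome && PySem.Chars.islower c && gs == [] then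
      (out, elem.map (· ++ [c]), gs)
    else if elem.isSome && PySem.Chars.isdigit c then
      (out, elem, gs ++ [c])
    else
      (pvFlush out elem gs, none, [])

def split_material_alt (mat : String) : List String :=
  let s := mat.toList.foldl pvStep ([], none, [])
  pvFlush s.1 s.2.1 s.2.2

-- ===== PRECONDITION & SPEC =====
def Spec_split_material (mat : String) (out : List String) : Prop := out = split_material_alt mat
instance (mat : String) (out : List String) : Decidable (Spec_split_material mat out) := by unfold Spec_split_material; infer_instance

-- ===== CLAIM (what is proved, stated in full; the proofs are below) =====
def Claim_equal_split_material : Prop := ∀ (mat : String), Dom_split_material mat → Spec_split_material mat (split_material mat)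

-- ===== LEMMAS AND PROOFS =====

theorem pv_lower_not_upper (c : Char) (h : PySem.Chars.islower c = true) :
    PySem.Chars.isupper c = false := by
  revert h
  simp only [PySem.Chars.islower, PySem.Chars.isupper, Bool.and_eq_true, decide_eq_true_eq,
    Bool.and_eq_false_iff, decide_eq_false_iff_not, Char.le_def, UInt32.le_iff_toNat_le]
  intro h
  have h1 : 'a'.val.toNat = 97 := rfl
  have h2 : 'z'.val.toNat = 122 := rfl
  have h3 : 'Z'.val.toNat = 90 := rfl
  right; omega

theorem pv_digit_not_upper (c : Char) (h : PySem.Chars.isdigit c = true) :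
    PySem.Chars.isupper c = false := by
  revert h
  simp only [PySem.Chars.isdigit, PySem.Chars.isupper, Bool.and_eq_true, decide_eq_true_eq,
    Bool.and_eq_false_iff, decide_eq_false_iff_not, Char.le_def, UInt32.le_iff_toNat_le]
  intro h
  have h1 : '0'.val.toNat = 48 := rfl
  have h2 : '9'.val.toNat = 57 := rfl
  have h3 : 'A'.val.toNat = 65 := rfl
  left; omega

theorem pv_digit_not_lower (c : Char) (h : PySem.Chars.isdigit c = true) :
    PySem.Chars.islower c = false := by
  revert h
  simp only [PySem.Chars.isdigit, PySem.Chars.islower, Bool.and_eq_true, decide_eq_true_eq,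
    Bool.and_eq_false_iff, decide_eq_false_iff_not, Char.le_def, UInt32.le_iff_toNat_le]
  intro h
  have h1 : '0'.val.toNat = 48 := rfl
  have h2 : '9'.val.toNat = 57 := rfl
  have h3 : 'a'.val.toNat = 97 := rfl
  left; omega

theorem pv_head_dropWhile {p : Char → Bool} : ∀ (l : List Char) {c : Char} {tl : List Char},
    l.dropWhile p = c :: tl → p c = false := by
  intro l
  induction l with
  | nil => intro c tl h; simp at h
  | cons a as ih =>
    intro c tl h
    by_cases ha : p a = true
    · exact ih (by simpa [List.dropWhile, ha] using h)
    · simp [List.dropWhile, ha] at h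
      rw [← h.1]; simpa using ha

theorem pv_dropWhile_of_takeWhile_nil {p : Char → Bool} (l : List Char)
    (h : l.takeWhile p = []) : l.dropWhile p = l := by
  cases l with
  | nil => simp
  | cons a as =>
    by_cases ha : p a = true
    · simp [List.takeWhile, ha] at h
    · simp [List.dropWhile, ha]

-- a run of lowercase letters extends the pending element
theorem foldl_lows (lows : List Char) (h : ∀ c ∈ lows, PySem.Chars.islower c = true) :
    ∀ (suf : List Char) (out : List String) (e : List Char),
    (lows ++ suf).foldl pvStep (out, some e, []) = suf.foldl pvStep (out, some (e ++ lows), []) := by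
  induction lows with
  | nil => intro suf out e; simp
  | cons c tl ih =>
    intro suf out e
    have hc : PySem.Chars.islower c = true := h c (by simp)
    have hcu := pv_lower_not_upper c hc
    have := ih (fun x hx => h x (by simp [hx])) suf out (e ++ [c])
    simpa [pvStep, hc, hcu] using this

-- a run of digits extends the pending digit string
theorem foldl_digits (ds : List Char) (h : ∀ c ∈ ds, PySem.Chars.isdigit c = true) :
    ∀ (suf : List Char) (out : List String) (e gs : List Char),
    (ds ++ suf).foldl pvStep (out, some e, gs) = suf.foldl pvStep (out, some e, gs ++ ds) := by
  induction ds with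
  | nil => intro suf out e gs; simp
  | cons c tl ih =>
    intro suf out e gs
    have hc : PySem.Chars.isdigit c = true := h c (by simp)
    have hcu := pv_digit_not_upper c hc
    have hcl := pv_digit_not_lower c hc
    have := ih (fun x hx => h x (by simp [hx])) suf out e (gs ++ [c])
    simpa [pvStep, hc, hcu, hcl] using this

-- once the next char cannot extend the pending token, the pending token may be flushed now
theorem flush_state (cs : List Char) (out : List String) (e gs : List Char)
    (h : cs = [] ∨ ∃ c tl, cs = c :: tl ∧ PySem.Chars.isdigit c = false ∧
        (PySem.Chars.islower c = false ∨ gs ≠ [])) :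
    (let s := cs.foldl pvStep (out, some e, gs); pvFlush s.1 s.2.1 s.2.2)
    = (let s := cs.foldl pvStep (pvFlush out (some e) gs, none, []); pvFlush s.1 s.2.1 s.2.2) := by
  rcases h with h | ⟨c, tl, rfl, hd, hl⟩
  · subst h; simp [pvFlush]
  · simp only [List.foldl_cons]
    have hstep : pvStep (out, some e, gs) c = pvStep (pvFlush out (some e) gs, none, []) c := by
      by_cases hu : PySem.Chars.isupper c = true
      · simp [pvStep, hu, pvFlush]
      · have h2 : (PySem.Chars.islower c && gs == []) = false := by
          rcases hl with hl | hl
          · simp [hl]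
          · simp [hl]
        simp [pvStep, hu, hd, pvFlush]
        intro hlow
        rcases hl with hl | hl
        · simp [hl] at hlow
        · exact hl
    rw [hstep]

theorem main_lemma : ∀ (cs : List Char) (out : List String),
    (let s := cs.foldl pvStep (out, none, []); pvFlush s.1 s.2.1 s.2.2) = out ++ splitLoop cs
  | [], out => by simp [pvFlush, splitLoop]
  | c :: rest, out => by
    by_cases hu : PySem.Chars.isupper c = true
    · -- element start
      have hrest : rest = rest.takeWhile PySem.Chars.islower ++ rest.dropWhile PySem.Chars.islower :=
        (List.takeWhile_append_dropWhile).symm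
      set lows := rest.takeWhile PySem.Chars.islower with hlows
      set after := rest.dropWhile PySem.Chars.islower with hafter
      have hafter2 : after = after.takeWhile PySem.Chars.isdigit ++ after.dropWhile PySem.Chars.isdigit :=
        (List.takeWhile_append_dropWhile).symm
      set ds := after.takeWhile PySem.Chars.isdigit with hds
      set after2 := after.dropWhile PySem.Chars.isdigit with hafter2'
      have hlen : after2.length < (c :: rest).length := by
        calc after2.length ≤ after.length := List.length_dropWhile_le ..
          _ ≤ rest.length := List.length_dropWhile_le ..
          _ < (c :: rest).length := by simp
      have step1 : pvStep (out, none, []) c = (out, some [c], []) := by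
        simp [pvStep, hu, pvFlush]
      have hcond : after2 = [] ∨ ∃ d tl, after2 = d :: tl ∧ PySem.Chars.isdigit d = false ∧
          (PySem.Chars.islower d = false ∨ ds ≠ []) := by
        cases h2 : after2 with
        | nil => exact Or.inl rfl
        | cons d tl =>
          refine Or.inr ⟨d, tl, rfl, pv_head_dropWhile after h2, ?_⟩
          by_cases hdsnil : ds = []
          · left
            have : after2 = after := pv_dropWhile_of_takeWhile_nil after hdsnil
            rw [this] at h2
            exact pv_head_dropWhile rest h2
          · exact Or.inr hdsnil
      calc (let s := (c :: rest).foldl pvStep (out, none, []); pvFlush s.1 s.2.1 s.2.2)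
          = (let s := rest.foldl pvStep (out, some [c], []); pvFlush s.1 s.2.1 s.2.2) := by
            rw [List.foldl_cons, step1]
        _ = (let s := (lows ++ after).foldl pvStep (out, some [c], []); pvFlush s.1 s.2.1 s.2.2) := by
            rw [← hrest]
        _ = (let s := after.foldl pvStep (out, some ([c] ++ lows), []); pvFlush s.1 s.2.1 s.2.2) := by
            rw [foldl_lows lows (fun x hx => List.mem_takeWhile_imp hx)]
        _ = (let s := (ds ++ after2).foldl pvStep (out, some (c :: lows), []); pvFlush s.1 s.2.1 s.2.2) := by
            rw [← hafter2]; rfl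
        _ = (let s := after2.foldl pvStep (out, some (c :: lows), [] ++ ds); pvFlush s.1 s.2.1 s.2.2) := by
            rw [foldl_digits ds (fun x hx => List.mem_takeWhile_imp hx)]
        _ = (let s := after2.foldl pvStep (pvFlush out (some (c :: lows)) ds, none, []); pvFlush s.1 s.2.1 s.2.2) := by
            rw [show ([] : List Char) ++ ds = ds from rfl]
            exact flush_state after2 out (c :: lows) ds hcond
        _ = pvFlush out (some (c :: lows)) ds ++ splitLoop after2 := main_lemma after2 _
        _ = out ++ splitLoop (c :: rest) := by
            rw [splitLoop, if_pos hu]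
            simp only [← hafter, ← hlows, ← hds, ← hafter2']
            simp [pvFlush]
    · -- stray character: skipped by both
      have step1 : pvStep (out, none, []) c = (out, none, []) := by
        simp [pvStep, hu, pvFlush]
      have := main_lemma rest out
      rw [List.foldl_cons, step1, splitLoop, if_neg hu]
      exact this
termination_by cs _ => cs.length
decreasing_by
  · exact hlen
  · simp

-- ===== VERDICT (by name: the statement is the Claim_ definition above) =====
theorem split_material_spec : Claim_equal_split_material := by
  intro mat _
  unfold Spec_split_material split_material split_material_alt
  simpa using (main_lemma mat.toList []).symm
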